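-- pv_equiv track=rewrite | github.com/AndrewShepherd/leetcode-python | fair-distribution-of-cookies/fair_distribution_of_cookies.py | solveUsingHeap
-- ===== SOURCE A (Python) =====
-- from heapq import heappop, heappush
--
-- def solveUsingHeap(cookies, k: int) -> int:
--     cookies.sort()
--
--     recipients = [0]*k
--
--     for c in reversed(cookies):
--         r = heappop(recipients)
--         r += c
--         heappush(recipients, r)
--
--     return max(recipients)
-- ===== SOURCE B (Python) =====
-- def solveUsingHeap(cookies, k: int) -> int:
--     cookies.sort()
--     recipients = [0] * k          # kept sorted in descending order; least-loaded is last
--     for c in reversed(cookies):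
--         v = recipients.pop() + c
--         lo, hi = 0, len(recipients)
--         while lo < hi:            # binary search for the insertion point keeping the order
--             mid = (lo + hi) // 2
--             if v > recipients[mid]:
--                 hi = mid
--             else:
--                 lo = mid + 1
--         recipients.insert(lo, v)
--     return max(recipients)
-- ===== Notes on version B (the rewrite author's own statement) =====
-- stated objective: alternative
-- what changed: Replaces the heapq min-heap of recipient loads with a plain descending-sorted list: the least-loaded recipient is pop()ed off the end and the updated load is re-inserted at the point found by a hand-rolled binary search.
import Mathlib
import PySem

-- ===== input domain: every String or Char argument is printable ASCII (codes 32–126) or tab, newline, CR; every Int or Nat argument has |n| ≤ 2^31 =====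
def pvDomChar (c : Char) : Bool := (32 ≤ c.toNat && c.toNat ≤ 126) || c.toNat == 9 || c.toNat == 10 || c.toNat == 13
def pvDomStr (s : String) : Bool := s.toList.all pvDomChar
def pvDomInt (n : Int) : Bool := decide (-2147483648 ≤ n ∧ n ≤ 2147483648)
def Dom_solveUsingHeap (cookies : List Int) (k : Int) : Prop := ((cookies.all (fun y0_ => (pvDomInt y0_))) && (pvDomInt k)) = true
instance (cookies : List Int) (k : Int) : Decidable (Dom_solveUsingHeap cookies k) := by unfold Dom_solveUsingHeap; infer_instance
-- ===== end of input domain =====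

-- B keeps the recipient loads as a descending-sorted plain list (pop() = least loaded, re-insert by
-- a hand-rolled binary search) instead of A's heapq min-heap (objective: alternative data structure).
-- Both A and B sort `cookies` in place; the equivalence proved is about the return value.


-- ===== PORT A =====
-- heappop/heappush at the value level: heappop returns the minimum element of the heap
-- (exact for heapq); the pile is kept as the list of loads, pop = remove the min, push = append.
def heapPopMin (l : List Int) : Int × List Int :=
  match l with
  | [] => (0, [])          -- heappop of an empty heap raises in Python; excluded by Pre_
  | h :: t =>
    let m := t.foldl min h
    (m, (h :: t).erase m)

def solveUsingHeap (cookies : List Int) (k : Int) : Int :=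
  let cs := PySem.List.sorted cookies (fun x => x) false
  let recipients : List Int := List.replicate k.toNat 0
  let final := cs.reverse.foldl (fun rs c =>
      let pr := heapPopMin rs
      pr.2 ++ [pr.1 + c]) recipients
  ((PySem.List.max? final (fun x => x)).getD 0)   -- max([]) raises in Python; excluded by Pre_

-- ===== PORT B =====
-- Source B's while-loop binary search: insertion point for v into the descending list rs within [lo, hi)
def bisectDesc (rs : List Int) (v : Int) (lo hi : Nat) : Nat :=
  if lo < hi then
    let mid := (lo + hi) / 2
    if v > rs.getD mid 0 then bisectDesc rs v lo mid    -- rs[mid]: 0 ≤ mid < len here, so getD is exact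
    else bisectDesc rs v (mid + 1) hi
  else lo
termination_by hi - lo
decreasing_by all_goals omega

def solveUsingHeap_alt (cookies : List Int) (k : Int) : Int :=
  let cs := PySem.List.sorted cookies (fun x => x) false
  let recipients : List Int := List.replicate k.toNat 0
  let final := cs.reverse.foldl (fun rs c =>
      match rs with
      | [] => []            -- recipients.pop() of an empty list raises in Python; excluded by Pre_
      | h :: t =>
        let v := (h :: t).getLast (List.cons_ne_nil h t) + c
        let rest := (h :: t).dropLast
        rest.insertIdx (bisectDesc rest v 0 rest.length) v) recipients
  ((PySem.List.max? final (fun x => x)).getD 0)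

-- ===== PRECONDITION & SPEC =====
-- With k ≤ 0 the recipient list is empty and Python A raises (IndexError from heappop, or
-- ValueError from max([])); B raises there too.  Pre_ is exactly the inputs where A returns.
def Pre_solveUsingHeap (cookies : List Int) (k : Int) : Prop := 1 ≤ k
instance (cookies : List Int) (k : Int) : Decidable (Pre_solveUsingHeap cookies k) := by unfold Pre_solveUsingHeap; infer_instance
def pvWitness_solveUsingHeap : List Int × Int := ([8, 15, 10, 20, 8], 2)

def Spec_solveUsingHeap (cookies : List Int) (k : Int) (out : Int) : Prop := out = solveUsingHeap_alt cookies k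
instance (cookies : List Int) (k : Int) (out : Int) : Decidable (Spec_solveUsingHeap cookies k out) := by unfold Spec_solveUsingHeap; infer_instance

-- ===== CLAIM (what is proved, stated in full; the proofs are below) =====
def Claim_equal_solveUsingHeap : Prop := ∀ (cookies : List Int) (k : Int), Dom_solveUsingHeap cookies k → Pre_solveUsingHeap cookies k → Spec_solveUsingHeap cookies k (solveUsingHeap cookies k)

-- ===== LEMMAS AND PROOFS =====

lemma foldl_min_le_init (t : List Int) (h : Int) : t.foldl min h ≤ h := by
  induction t generalizing h with
  | nil => simp
  | cons x xs ih => simpa using le_trans (ih (min h x)) (min_le_left _ _)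

lemma foldl_min_mem (t : List Int) (h : Int) : t.foldl min h ∈ h :: t := by
  induction t generalizing h with
  | nil => simp
  | cons x xs ih =>
    have h0 : List.foldl min h (x :: xs) = List.foldl min (min h x) xs := rfl
    rw [h0]
    rcases List.mem_cons.1 (ih (min h x)) with hm | hm
    · rw [hm]
      rcases le_total h x with hle | hle
      · simp [min_eq_left hle]
      · simp [min_eq_right hle]
    · simp [hm]

lemma foldl_min_le (t : List Int) (h : Int) : ∀ x ∈ h :: t, t.foldl min h ≤ x := by
  induction t generalizing h with
  | nil => intro x hx; simp at hx; simp [hx]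
  | cons y ys ih =>
    intro x hx
    rcases List.mem_cons.1 hx with rfl | hx
    · exact foldl_min_le_init _ _
    · rcases List.mem_cons.1 hx with rfl | hx
      · exact le_trans (foldl_min_le_init ys (min h x)) (min_le_right _ _)
      · exact ih (min h y) x (List.mem_cons_of_mem _ hx)

-- the min of a list is determined by membership + lower bound, so it is perm-invariant
lemma min_eq_of_perm {a : Int} {as' : List Int} {b : Int} {bs' : List Int}
    (hp : (a :: as').Perm (b :: bs')) : as'.foldl min a = bs'.foldl min b := by
  have h1 : as'.foldl min a ∈ b :: bs' := hp.mem_iff.1 (foldl_min_mem _ _)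
  have h2 : bs'.foldl min b ∈ a :: as' := hp.symm.mem_iff.1 (foldl_min_mem _ _)
  exact le_antisymm (foldl_min_le _ _ _ h2) (foldl_min_le _ _ _ h1)

-- the last element of a descending-sorted nonempty list is its minimum
lemma getLast_eq_min (h : Int) (t : List Int)
    (hs : (h :: t).Pairwise (fun a b => b ≤ a)) :
    (h :: t).getLast (List.cons_ne_nil h t) = t.foldl min h := by
  have hg := List.pairwise_iff_getElem.1 hs
  have hlenpos : 0 < (h :: t).length := by simp
  have hlast : (h :: t).getLast (List.cons_ne_nil h t) = (h :: t)[(h :: t).length - 1] :=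
    List.getLast_eq_getElem _
  refine le_antisymm ?_ ?_
  · obtain ⟨i, hi, hival⟩ := List.mem_iff_getElem.1 (foldl_min_mem t h)
    rw [hlast, ← hival]
    rcases Nat.lt_or_ge i ((h :: t).length - 1) with hlt | hge
    · exact hg i ((h :: t).length - 1) hi (by omega) hlt
    · have : i = (h :: t).length - 1 := by omega
      simp [this]
  · exact foldl_min_le t h _ (hlast ▸ List.getElem_mem _)

-- removing the last element is, as a multiset, removing (one copy of) its value
lemma erase_last_perm (l rest : List Int) (x : Int) (hd : l = rest ++ [x]) :
    (l.erase x).Perm rest := by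
  subst hd
  have h2 := (List.perm_append_singleton x rest).erase x
  rwa [List.erase_cons_head] at h2

lemma erase_getLast_perm (h : Int) (t : List Int) :
    ((h :: t).erase ((h :: t).getLast (List.cons_ne_nil h t))).Perm ((h :: t).dropLast) :=
  erase_last_perm _ _ _ (List.dropLast_concat_getLast (List.cons_ne_nil h t)).symm

-- the binary search returns a cut point: everything before it is ≥ v, everything from it on is < v
lemma bisectDesc_spec (rs : List Int) (v : Int)
    (hs : rs.Pairwise (fun a b => b ≤ a)) : ∀ (lo hi : Nat), lo ≤ hi → hi ≤ rs.length →
    (∀ i (_ : i < rs.length), i < lo → v ≤ rs[i]) →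
    (∀ i (_ : i < rs.length), hi ≤ i → rs[i] < v) →
    lo ≤ bisectDesc rs v lo hi ∧ bisectDesc rs v lo hi ≤ hi ∧
    (∀ i (_ : i < rs.length), i < bisectDesc rs v lo hi → v ≤ rs[i]) ∧
    (∀ i (_ : i < rs.length), bisectDesc rs v lo hi ≤ i → rs[i] < v) := by
  have hg := List.pairwise_iff_getElem.1 hs
  intro lo hi
  induction hm : hi - lo using Nat.strong_induction_on generalizing lo hi with
  | _ n ih =>
    intro hlohi hlen hpre hsuf
    by_cases hlt : lo < hi
    · have hmidlt : (lo + hi) / 2 < rs.length := by omega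
      rw [bisectDesc, if_pos hlt]
      have hgetd : rs.getD ((lo + hi) / 2) 0 = rs[(lo + hi) / 2] := List.getD_eq_getElem rs 0 hmidlt
      by_cases hv : v > rs.getD ((lo + hi) / 2) 0
      · rw [if_pos hv]
        refine (ih (((lo + hi) / 2) - lo) (by omega) lo ((lo + hi) / 2) rfl (by omega) (by omega)
          hpre ?_).imp (fun hh => hh) (fun hh => hh.imp (fun h2 => by omega) (fun h2 => h2))
        intro i hilen hmid
        rcases Nat.lt_or_ge ((lo + hi) / 2) i with hlt2 | hge2
        · calc rs[i] ≤ rs[(lo + hi) / 2] := hg _ _ hmidlt hilen hlt2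
            _ < v := by rw [← hgetd]; exact hv
        · have : i = (lo + hi) / 2 := by omega
          subst this
          rw [← hgetd]; exact hv
      · rw [if_neg hv]
        refine (ih (hi - (((lo + hi) / 2) + 1)) (by omega) (((lo + hi) / 2) + 1) hi rfl (by omega)
          hlen ?_ hsuf).imp (fun hh => by omega) (fun hh => hh)
        intro i hilen hmid
        rcases Nat.lt_or_ge i lo with hlt2 | hge2
        · exact hpre i hilen hlt2
        · have hvm : v ≤ rs[(lo + hi) / 2] := by rw [← hgetd]; omega
          rcases Nat.lt_or_ge i ((lo + hi) / 2) with hlt3 | hge3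
          · exact le_trans hvm (hg _ _ hilen hmidlt hlt3)
          · have : i = (lo + hi) / 2 := by omega
            subst this; exact hvm
    · rw [bisectDesc, if_neg hlt]
      have : lo = hi := by omega
      subst this
      exact ⟨le_refl _, le_refl _, hpre, hsuf⟩

-- inserting v at the cut point keeps the list descending-sorted
lemma insert_sorted (rest : List Int) (v : Int) (pos : Nat)
    (hs : rest.Pairwise (fun a b => b ≤ a)) (hpos : pos ≤ rest.length)
    (hpre : ∀ i (_ : i < rest.length), i < pos → v ≤ rest[i])
    (hsuf : ∀ i (_ : i < rest.length), pos ≤ i → rest[i] < v) :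
    (rest.insertIdx pos v).Pairwise (fun a b => b ≤ a) := by
  have hg := List.pairwise_iff_getElem.1 hs
  have hlen : (rest.insertIdx pos v).length = rest.length + 1 :=
    List.length_insertIdx_of_le_length hpos v
  rw [List.pairwise_iff_getElem]
  intro i j hi hj hij
  rw [hlen] at hi hj
  have hget : ∀ (m : Nat) (hm : m < (rest.insertIdx pos v).length),
      (rest.insertIdx pos v)[m] = if hmp : m < pos then rest[m]'(by rw [hlen] at hm; omega)
        else if m = pos then v else rest[m - 1]'(by rw [hlen] at hm; omega) := by
    intro m hm
    by_cases h1 : m < pos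
    · rw [dif_pos h1]; exact List.getElem_insertIdx_of_lt h1 hm
    · rw [dif_neg h1]
      by_cases h2 : m = pos
      · subst h2; rw [if_pos rfl]; exact List.getElem_insertIdx_self hm
      · rw [if_neg h2]
        exact List.getElem_insertIdx_of_gt (by omega) hm
  rw [hget i (by omega), hget j (by omega)]
  by_cases hip : i < pos
  · rw [dif_pos hip]
    by_cases hjp : j < pos
    · rw [dif_pos hjp]; exact hg i j (by omega) (by omega) hij
    · rw [dif_neg hjp]
      by_cases hjq : j = pos
      · rw [if_pos hjq]; exact hpre i (by omega) hip
      · rw [if_neg hjq]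
        rcases Nat.lt_or_ge (j - 1) rest.length with _ | _
        · rcases Nat.lt_or_ge i (j - 1) with hlt | hge
          · exact hg i (j - 1) (by omega) (by omega) hlt
          · have : i = j - 1 := by omega
            subst this; exact le_refl _
        · omega
  · rw [dif_neg hip]
    by_cases hiq : i = pos
    · rw [if_pos hiq]
      have hjp : ¬ j < pos := by omega
      have hjq : j ≠ pos := by omega
      rw [dif_neg hjp, if_neg hjq]
      exact le_of_lt (hsuf (j - 1) (by omega) (by omega))
    · rw [if_neg hiq]
      have hjp : ¬ j < pos := by omega
      have hjq : j ≠ pos := by omega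
      rw [dif_neg hjp, if_neg hjq]
      exact hg (i - 1) (j - 1) (by omega) (by omega) (by omega)

-- the two fold bodies, applied to permuted states (B's descending-sorted, A's nonempty),
-- stay permuted; A's state stays nonempty
lemma fold_invariant (cs : List Int) : ∀ (as bs : List Int), as.Perm bs → as ≠ [] →
    bs.Pairwise (fun a b => b ≤ a) →
    (cs.foldl (fun rs c => let pr := heapPopMin rs; pr.2 ++ [pr.1 + c]) as).Perm
      (cs.foldl (fun rs c =>
        match rs with
        | [] => []
        | h :: t =>
          let v := (h :: t).getLast (List.cons_ne_nil h t) + c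
          let rest := (h :: t).dropLast
          rest.insertIdx (bisectDesc rest v 0 rest.length) v) bs) ∧
    (cs.foldl (fun rs c => let pr := heapPopMin rs; pr.2 ++ [pr.1 + c]) as) ≠ [] := by
  induction cs with
  | nil => intro as bs hp hne _; exact ⟨hp, hne⟩
  | cons c cs ih =>
    intro as bs hp hne hsort
    match as, bs, hp.length_eq, hne with
    | a :: as', b :: bs', _, _ =>
      have hlastv : (b :: bs').getLast (List.cons_ne_nil b bs') = bs'.foldl min b :=
        getLast_eq_min b bs' hsort
      have hmin : as'.foldl min a = (b :: bs').getLast (List.cons_ne_nil b bs') := by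
        rw [hlastv]; exact min_eq_of_perm hp
      have hrest : (b :: bs').dropLast.Pairwise (fun a b => b ≤ a) :=
        hsort.sublist (List.dropLast_sublist _)
      obtain ⟨hlo, hhi, hcutpre, hcutsuf⟩ :=
        bisectDesc_spec ((b :: bs').dropLast) ((b :: bs').getLast (List.cons_ne_nil b bs') + c)
          hrest 0 ((b :: bs').dropLast.length) (Nat.zero_le _) (le_refl _)
          (fun i _ h => absurd h (Nat.not_lt_zero i))
          (fun i h1 h2 => absurd h1 (Nat.not_lt.2 h2))
      have e1 : ((a :: as').erase ((b :: bs').getLast (List.cons_ne_nil b bs'))).Perm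
          ((b :: bs').dropLast) :=
        (hp.erase _).trans (erase_getLast_perm b bs')
      have e2 : (((b :: bs').dropLast) ++ [(b :: bs').getLast (List.cons_ne_nil b bs') + c]).Perm
          (((b :: bs').dropLast).insertIdx
            (bisectDesc ((b :: bs').dropLast) ((b :: bs').getLast (List.cons_ne_nil b bs') + c) 0
              ((b :: bs').dropLast.length))
            ((b :: bs').getLast (List.cons_ne_nil b bs') + c)) :=
        (List.perm_append_singleton _ _).trans (List.perm_insertIdx _ _ hhi).symm
      have estep : ((a :: as').erase (as'.foldl min a) ++ [as'.foldl min a + c]).Perm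
          (((b :: bs').dropLast).insertIdx
            (bisectDesc ((b :: bs').dropLast) ((b :: bs').getLast (List.cons_ne_nil b bs') + c) 0
              ((b :: bs').dropLast.length))
            ((b :: bs').getLast (List.cons_ne_nil b bs') + c)) := by
        rw [hmin]
        exact (e1.append_right _).trans e2
      have hsortnew : (((b :: bs').dropLast).insertIdx
            (bisectDesc ((b :: bs').dropLast) ((b :: bs').getLast (List.cons_ne_nil b bs') + c) 0
              ((b :: bs').dropLast.length))
            ((b :: bs').getLast (List.cons_ne_nil b bs') + c)).Pairwise (fun a b => b ≤ a) :=
        insert_sorted _ _ _ hrest hhi hcutpre hcutsuf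
      simp only [List.foldl]
      exact ih _ _ (by simpa [heapPopMin] using estep) (by simp [heapPopMin]) hsortnew

lemma max?_eq_of_perm {as bs : List Int} (hp : as.Perm bs) (hne : as ≠ []) :
    PySem.List.max? as (fun x => x) = PySem.List.max? bs (fun x => x) := by
  obtain ⟨ma, hma⟩ : ∃ m, PySem.List.max? as (fun x => x) = some m := by
    rcases hh : PySem.List.max? as (fun x => x) with _ | m
    · exact absurd ((PySem.List.max?_eq_none_iff as (fun x => x)).1 hh) hne
    · exact ⟨m, rfl⟩
  obtain ⟨mb, hmb⟩ : ∃ m, PySem.List.max? bs (fun x => x) = some m := by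
    rcases hh : PySem.List.max? bs (fun x => x) with _ | m
    · have hbs := (PySem.List.max?_eq_none_iff bs (fun x => x)).1 hh
      subst hbs
      exact absurd hp.eq_nil hne
    · exact ⟨m, rfl⟩
  have h1 : ma ≤ mb := PySem.List.max?_isMax hmb ma (hp.mem_iff.1 (PySem.List.max?_mem hma))
  have h2 : mb ≤ ma := PySem.List.max?_isMax hma mb (hp.symm.mem_iff.1 (PySem.List.max?_mem hmb))
  rw [hma, hmb, le_antisymm h1 h2]

-- ===== VERDICT (by name: the statement is the Claim_ definition above) =====
theorem solveUsingHeap_spec : Claim_equal_solveUsingHeap := by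
  intro cookies k _ hpre
  unfold Spec_solveUsingHeap solveUsingHeap solveUsingHeap_alt
  have hk : k.toNat ≠ 0 := by
    unfold Pre_solveUsingHeap at hpre; omega
  have hne : (List.replicate k.toNat (0 : Int)) ≠ [] := by
    simp [List.replicate_eq_nil_iff, hk]
  have hsort : (List.replicate k.toNat (0 : Int)).Pairwise (fun a b => b ≤ a) :=
    List.pairwise_replicate.2 (Or.inr (le_refl 0))
  obtain ⟨hperm, hne2⟩ := fold_invariant
    (PySem.List.sorted cookies (fun x => x) false).reverse
    (List.replicate k.toNat 0) (List.replicate k.toNat 0) (List.Perm.refl _) hne hsort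
  simp only [max?_eq_of_perm hperm hne2]
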